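-- pv_equiv track=rewrite | github.com/chrisarcherus/CloudPepper | pos_bluemax/controllers/main.py | _get_card_type
-- ===== SOURCE A (Python) =====
-- def _get_card_type(card_number):
--     card_types = {
--         "Visa": ["4"],
--         "MasterCard": ["51", "52", "53", "54", "55"],
--         "American Express": ["34", "37"],
--         "Discover": ["6011", "644", "645", "646", "647", "648", "649", "65"],
--         "Diners Club": ["300", "301", "302", "303", "304", "305", "36", "38"]
--     }
--
--     first_four_digits = card_number[:4]
--
--     for card, prefixes in card_types.items():
--         for prefix in prefixes:
--             if first_four_digits.startswith(prefix):
--                 return card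
--     return ""
-- ===== SOURCE B (Python) =====
-- def _get_card_type(card_number):
--     # the card_types table of A, inverted: one flat prefix -> card-name dict
--     prefix_to_card = {
--         "4": "Visa",
--         "51": "MasterCard", "52": "MasterCard", "53": "MasterCard",
--         "54": "MasterCard", "55": "MasterCard",
--         "34": "American Express", "37": "American Express",
--         "6011": "Discover", "644": "Discover", "645": "Discover",
--         "646": "Discover", "647": "Discover", "648": "Discover",
--         "649": "Discover", "65": "Discover",
--         "300": "Diners Club", "301": "Diners Club", "302": "Diners Club",
--         "303": "Diners Club", "304": "Diners Club", "305": "Diners Club",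
--         "36": "Diners Club", "38": "Diners Club",
--     }
--     first_four = card_number[:4]
--     for length in (4, 3, 2, 1):
--         card = prefix_to_card.get(first_four[:length])
--         if card is not None:
--             return card
--     return ""
-- ===== Notes on version B (the rewrite author's own statement) =====
-- stated objective: idiomatic
-- what changed: Replaces the nested scan over the card->prefixes table with an inverted flat prefix->card dict plus a longest-prefix-first lookup over prefix lengths 4..1; valid because the table's prefixes of different cards are prefix-disjoint.
import Mathlib
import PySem

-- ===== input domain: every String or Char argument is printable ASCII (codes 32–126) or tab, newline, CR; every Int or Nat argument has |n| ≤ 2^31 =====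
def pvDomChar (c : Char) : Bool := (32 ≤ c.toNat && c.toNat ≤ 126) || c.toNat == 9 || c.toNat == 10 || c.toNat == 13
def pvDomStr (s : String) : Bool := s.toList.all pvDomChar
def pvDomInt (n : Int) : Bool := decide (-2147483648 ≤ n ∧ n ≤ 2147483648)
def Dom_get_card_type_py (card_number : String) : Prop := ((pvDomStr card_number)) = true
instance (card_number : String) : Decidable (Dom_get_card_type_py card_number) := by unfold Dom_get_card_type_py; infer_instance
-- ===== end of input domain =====

-- B replaces A's nested scan with an inverted flat prefix→card dict and a longest-prefix-first
-- lookup (lengths 4,3,2,1); more idiomatic, same results since the table's prefixes are disjoint.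

-- ===== PORT A =====
-- the card_types table, in A's (insertion) order
def pvCardTypes : List (String × List String) :=
  [("Visa", ["4"]),
   ("MasterCard", ["51", "52", "53", "54", "55"]),
   ("American Express", ["34", "37"]),
   ("Discover", ["6011", "644", "645", "646", "647", "648", "649", "65"]),
   ("Diners Club", ["300", "301", "302", "303", "304", "305", "36", "38"])]

-- inner loop: 'for prefix in prefixes: if first_four.startswith(prefix): return card'
def pvFindPrefix (ff : String) (card : String) : List String → Option String
  | [] => none
  | p :: ps => if PySem.Str.startswith ff p then some card else pvFindPrefix ff card ps

-- outer loop: 'for card, prefixes in card_types.items(): …'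
def pvScanTypes (ff : String) : List (String × List String) → String
  | [] => ""
  | (card, ps) :: rest =>
    match pvFindPrefix ff card ps with
    | some c => c
    | none => pvScanTypes ff rest

def get_card_type_py (card_number : String) : String :=
  let first_four_digits := PySem.Str.slice card_number none (some 4)
  pvScanTypes first_four_digits pvCardTypes

-- ===== PORT B =====
-- A's card_types table inverted: one flat prefix -> card-name dict literal
def pvPrefixToCard : PySem.Dict String String :=
  PySem.Dict.ofList
    [("4", "Visa"),
     ("51", "MasterCard"), ("52", "MasterCard"), ("53", "MasterCard"),
     ("54", "MasterCard"), ("55", "MasterCard"),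
     ("34", "American Express"), ("37", "American Express"),
     ("6011", "Discover"), ("644", "Discover"), ("645", "Discover"),
     ("646", "Discover"), ("647", "Discover"), ("648", "Discover"),
     ("649", "Discover"), ("65", "Discover"),
     ("300", "Diners Club"), ("301", "Diners Club"), ("302", "Diners Club"),
     ("303", "Diners Club"), ("304", "Diners Club"), ("305", "Diners Club"),
     ("36", "Diners Club"), ("38", "Diners Club")]

-- 'for length in (4, 3, 2, 1): card = prefix_to_card.get(first_four[:length]); if card is not None: return card'
def pvLongestLookup (ff : String) : List Int → String
  | [] => ""
  | L :: Ls =>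
    match pvPrefixToCard.get? (PySem.Str.slice ff none (some L)) with
    | some c => c
    | none => pvLongestLookup ff Ls

def get_card_type_py_alt (card_number : String) : String :=
  let first_four := PySem.Str.slice card_number none (some 4)
  pvLongestLookup first_four [4, 3, 2, 1]

-- ===== PRECONDITION & SPEC =====
def Spec_get_card_type_py (card_number : String) (out : String) : Prop := out = get_card_type_py_alt card_number
instance (card_number : String) (out : String) : Decidable (Spec_get_card_type_py card_number out) := by unfold Spec_get_card_type_py; infer_instance

-- ===== CLAIM (what is proved, stated in full; the proofs are below) =====
def Claim_equal_get_card_type_py : Prop := ∀ (card_number : String), Dom_get_card_type_py card_number → Spec_get_card_type_py card_number (get_card_type_py card_number)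

-- ===== LEMMAS AND PROOFS =====
-- the prefix dict literal, with the ofList constructor evaluated away
theorem pvDictEval : pvPrefixToCard = PySem.Dict.mk [("4", "Visa"), ("51", "MasterCard"), ("52", "MasterCard"), ("53", "MasterCard"), ("54", "MasterCard"), ("55", "MasterCard"), ("34", "American Express"), ("37", "American Express"), ("6011", "Discover"), ("644", "Discover"), ("645", "Discover"), ("646", "Discover"), ("647", "Discover"), ("648", "Discover"), ("649", "Discover"), ("65", "Discover"), ("300", "Diners Club"), ("301", "Diners Club"), ("302", "Diners Club"), ("303", "Diners Club"), ("304", "Diners Club"), ("305", "Diners Club"), ("36", "Diners Club"), ("38", "Diners Club")] := by rfl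
-- case analysis on the first (up to) four characters of the card number

theorem pvShape0 : get_card_type_py (String.ofList []) = get_card_type_py_alt (String.ofList []) := by
  decide

theorem pvShape1 (c1 : Char) :
    get_card_type_py (String.ofList [c1]) = get_card_type_py_alt (String.ofList [c1]) := by
  simp only [get_card_type_py, get_card_type_py_alt, pvScanTypes, pvFindPrefix,
    pvLongestLookup, pvCardTypes, pvDictEval]
  simp [PySem.Str.slice, PySem.Chars.startswith, PySem.Dict.get?, 
    PySem.List.slice, PySem.List.clampIdx, List.isPrefixOf,
    beq_iff_eq, String.ext_iff]
  by_cases h4 : c1 = '4'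
  · simp_all []
  simp_all [beq_iff_eq, String.ext_iff, Ne.symm h4]

theorem pvShape2 (c1 c2 : Char) :
    get_card_type_py (String.ofList [c1, c2]) = get_card_type_py_alt (String.ofList [c1, c2]) := by
  simp only [get_card_type_py, get_card_type_py_alt, pvScanTypes, pvFindPrefix,
    pvLongestLookup, pvCardTypes, pvDictEval]
  simp [PySem.Str.slice, PySem.Chars.startswith, PySem.Dict.get?, 
    PySem.List.slice, PySem.List.clampIdx, List.isPrefixOf,
    beq_iff_eq, String.ext_iff]
  by_cases h4 : c1 = '4'
  · simp_all [beq_iff_eq, String.ext_iff]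
  by_cases h5 : c1 = '5'
  · subst h5
    by_cases e1 : c2 = '1'; · simp_all []
    by_cases e2 : c2 = '2'; · simp_all []
    by_cases e3 : c2 = '3'; · simp_all []
    by_cases e4 : c2 = '4'; · simp_all []
    by_cases e5 : c2 = '5'; · simp_all []
    simp_all [beq_iff_eq, String.ext_iff,
      Ne.symm e1, Ne.symm e2, Ne.symm e3, Ne.symm e4, Ne.symm e5]
  by_cases h3 : c1 = '3'
  · subst h3
    by_cases e4 : c2 = '4'; · simp_all []
    by_cases e7 : c2 = '7'; · simp_all []
    by_cases e6 : c2 = '6'; · simp_all []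
    by_cases e8 : c2 = '8'; · simp_all []
    simp_all [beq_iff_eq, String.ext_iff,
      Ne.symm e4, Ne.symm e7, Ne.symm e6, Ne.symm e8]
  by_cases h6 : c1 = '6'
  · subst h6
    by_cases e5 : c2 = '5'; · simp_all []
    simp_all [beq_iff_eq, String.ext_iff, Ne.symm e5]
  simp_all [beq_iff_eq, String.ext_iff,
    Ne.symm h4, Ne.symm h5, Ne.symm h3, Ne.symm h6]

theorem pvShape3 (c1 c2 c3 : Char) :
    get_card_type_py (String.ofList [c1, c2, c3]) = get_card_type_py_alt (String.ofList [c1, c2, c3]) := by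
  simp only [get_card_type_py, get_card_type_py_alt, pvScanTypes, pvFindPrefix,
    pvLongestLookup, pvCardTypes, pvDictEval]
  simp [PySem.Str.slice, PySem.Chars.startswith, PySem.Dict.get?, 
    PySem.List.slice, PySem.List.clampIdx, List.isPrefixOf,
    beq_iff_eq, String.ext_iff]
  by_cases h4 : c1 = '4'
  · simp_all [beq_iff_eq, String.ext_iff]
  by_cases h5 : c1 = '5'
  · subst h5
    by_cases e1 : c2 = '1'; · simp_all [beq_iff_eq, String.ext_iff]
    by_cases e2 : c2 = '2'; · simp_all [beq_iff_eq, String.ext_iff]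
    by_cases e3 : c2 = '3'; · simp_all [beq_iff_eq, String.ext_iff]
    by_cases e4 : c2 = '4'; · simp_all [beq_iff_eq, String.ext_iff]
    by_cases e5 : c2 = '5'; · simp_all [beq_iff_eq, String.ext_iff]
    simp_all [beq_iff_eq, String.ext_iff,
      Ne.symm e1, Ne.symm e2, Ne.symm e3, Ne.symm e4, Ne.symm e5]
  by_cases h3 : c1 = '3'
  · subst h3
    by_cases e4 : c2 = '4'; · simp_all [beq_iff_eq, String.ext_iff]
    by_cases e7 : c2 = '7'; · simp_all [beq_iff_eq, String.ext_iff]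
    by_cases e0 : c2 = '0'
    · subst e0
      by_cases f0 : c3 = '0'; · simp_all []
      by_cases f1 : c3 = '1'; · simp_all []
      by_cases f2 : c3 = '2'; · simp_all []
      by_cases f3 : c3 = '3'; · simp_all []
      by_cases f4 : c3 = '4'; · simp_all []
      by_cases f5 : c3 = '5'; · simp_all []
      simp_all [beq_iff_eq, String.ext_iff,
        Ne.symm f0, Ne.symm f1, Ne.symm f2, Ne.symm f3, Ne.symm f4, Ne.symm f5]
    by_cases e6 : c2 = '6'; · simp_all [beq_iff_eq, String.ext_iff]
    by_cases e8 : c2 = '8'; · simp_all [beq_iff_eq, String.ext_iff]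
    simp_all [beq_iff_eq, String.ext_iff,
      Ne.symm e4, Ne.symm e7, Ne.symm e0, Ne.symm e6, Ne.symm e8]
  by_cases h6 : c1 = '6'
  · subst h6
    by_cases e4 : c2 = '4'
    · subst e4
      by_cases f4 : c3 = '4'; · simp_all []
      by_cases f5 : c3 = '5'; · simp_all []
      by_cases f6 : c3 = '6'; · simp_all []
      by_cases f7 : c3 = '7'; · simp_all []
      by_cases f8 : c3 = '8'; · simp_all []
      by_cases f9 : c3 = '9'; · simp_all []
      simp_all [beq_iff_eq, String.ext_iff,
        Ne.symm f4, Ne.symm f5, Ne.symm f6, Ne.symm f7, Ne.symm f8, Ne.symm f9]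
    by_cases e5 : c2 = '5'; · simp_all [beq_iff_eq, String.ext_iff]
    simp_all [beq_iff_eq, String.ext_iff, Ne.symm e4, Ne.symm e5]
  simp_all [beq_iff_eq, String.ext_iff,
    Ne.symm h4, Ne.symm h5, Ne.symm h3, Ne.symm h6]

theorem pvShape4 (c1 c2 c3 c4 : Char) (rest : List Char) :
    get_card_type_py (String.ofList (c1 :: c2 :: c3 :: c4 :: rest))
      = get_card_type_py_alt (String.ofList (c1 :: c2 :: c3 :: c4 :: rest)) := by
  simp only [get_card_type_py, get_card_type_py_alt, pvScanTypes, pvFindPrefix,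
    pvLongestLookup, pvCardTypes, pvDictEval]
  simp [PySem.Str.slice, PySem.Chars.startswith, PySem.Dict.get?, 
    PySem.List.slice, PySem.List.clampIdx, List.isPrefixOf,
    beq_iff_eq, String.ext_iff]
  by_cases h4 : c1 = '4'
  · simp_all [beq_iff_eq, String.ext_iff]
  by_cases h5 : c1 = '5'
  · subst h5
    by_cases e1 : c2 = '1'; · simp_all [beq_iff_eq, String.ext_iff]
    by_cases e2 : c2 = '2'; · simp_all [beq_iff_eq, String.ext_iff]
    by_cases e3 : c2 = '3'; · simp_all [beq_iff_eq, String.ext_iff]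
    by_cases e4 : c2 = '4'; · simp_all [beq_iff_eq, String.ext_iff]
    by_cases e5 : c2 = '5'; · simp_all [beq_iff_eq, String.ext_iff]
    simp_all [beq_iff_eq, String.ext_iff,
      Ne.symm e1, Ne.symm e2, Ne.symm e3, Ne.symm e4, Ne.symm e5]
  by_cases h3 : c1 = '3'
  · subst h3
    by_cases e4 : c2 = '4'; · simp_all [beq_iff_eq, String.ext_iff]
    by_cases e7 : c2 = '7'; · simp_all [beq_iff_eq, String.ext_iff]
    by_cases e0 : c2 = '0'
    · subst e0
      by_cases f0 : c3 = '0'; · simp_all [beq_iff_eq, String.ext_iff]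
      by_cases f1 : c3 = '1'; · simp_all [beq_iff_eq, String.ext_iff]
      by_cases f2 : c3 = '2'; · simp_all [beq_iff_eq, String.ext_iff]
      by_cases f3 : c3 = '3'; · simp_all [beq_iff_eq, String.ext_iff]
      by_cases f4 : c3 = '4'; · simp_all [beq_iff_eq, String.ext_iff]
      by_cases f5 : c3 = '5'; · simp_all [beq_iff_eq, String.ext_iff]
      simp_all [beq_iff_eq, String.ext_iff,
        Ne.symm f0, Ne.symm f1, Ne.symm f2, Ne.symm f3, Ne.symm f4, Ne.symm f5]
    by_cases e6 : c2 = '6'; · simp_all [beq_iff_eq, String.ext_iff]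
    by_cases e8 : c2 = '8'; · simp_all [beq_iff_eq, String.ext_iff]
    simp_all [beq_iff_eq, String.ext_iff,
      Ne.symm e4, Ne.symm e7, Ne.symm e0, Ne.symm e6, Ne.symm e8]
  by_cases h6 : c1 = '6'
  · subst h6
    by_cases e0 : c2 = '0'
    · subst e0
      by_cases f1 : c3 = '1'
      · subst f1
        by_cases g1 : c4 = '1'; · simp_all []
        simp_all [beq_iff_eq, String.ext_iff, Ne.symm g1]
      simp_all [beq_iff_eq, String.ext_iff, Ne.symm f1]
    by_cases e4 : c2 = '4'
    · subst e4
      by_cases f4 : c3 = '4'; · simp_all [beq_iff_eq, String.ext_iff]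
      by_cases f5 : c3 = '5'; · simp_all [beq_iff_eq, String.ext_iff]
      by_cases f6 : c3 = '6'; · simp_all [beq_iff_eq, String.ext_iff]
      by_cases f7 : c3 = '7'; · simp_all [beq_iff_eq, String.ext_iff]
      by_cases f8 : c3 = '8'; · simp_all [beq_iff_eq, String.ext_iff]
      by_cases f9 : c3 = '9'; · simp_all [beq_iff_eq, String.ext_iff]
      simp_all [beq_iff_eq, String.ext_iff,
        Ne.symm f4, Ne.symm f5, Ne.symm f6, Ne.symm f7, Ne.symm f8, Ne.symm f9]
    by_cases e5 : c2 = '5'; · simp_all [beq_iff_eq, String.ext_iff]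
    simp_all [beq_iff_eq, String.ext_iff, Ne.symm e0, Ne.symm e4, Ne.symm e5]
  simp_all [beq_iff_eq, String.ext_iff,
    Ne.symm h4, Ne.symm h5, Ne.symm h3, Ne.symm h6]

theorem pv_main (s : String) : get_card_type_py s = get_card_type_py_alt s := by
  obtain ⟨l, rfl⟩ : ∃ l, s = String.ofList l := ⟨s.toList, (String.ofList_toList).symm⟩
  rcases l with _ | ⟨c1, _ | ⟨c2, _ | ⟨c3, _ | ⟨c4, rest⟩⟩⟩⟩
  · exact pvShape0
  · exact pvShape1 c1
  · exact pvShape2 c1 c2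
  · exact pvShape3 c1 c2 c3
  · exact pvShape4 c1 c2 c3 c4 rest

-- ===== VERDICT (by name: the statement is the Claim_ definition above) =====
theorem get_card_type_py_spec : Claim_equal_get_card_type_py := by
  intro s _
  unfold Spec_get_card_type_py
  exact pv_main s
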